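-- pv_equiv track=rewrite | github.com/RazLandau/Various-PYTHON-Projects | Miscellaneous.py | suffix_prefix_overlap_hash1
-- ===== SOURCE A (Python) =====
-- def suffix_prefix_overlap_hash1(lst, k):
--     """ Return list of all (i,j) in lst so that i's suffix and j's prefix
--     of length k match in O(k*n) """
--     d = Dict(len(lst))
--     for i in range(len(lst)):
--         d.insert(lst[i][-k:],i)
--     return [(suffix, prefix) \
--             for prefix in range(len(lst)) \
--             for suffix in d.find(lst[prefix][:k]) \
--             if suffix != prefix]
--     return result
--
-- class Dict:
--     """ Used in suffix_prefix_overlap_hash1 """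
--     def __init__(self, m, hash_func=hash):
--         """ initial hash table, m empty entries """
--         self.table = [ [] for i in range(m)]
--         self.hash_mod = lambda x: hash_func(x) % m
--
--     def __repr__(self):
--         L = [self.table[i] for i in range(len(self.table))]
--         return "".join([str(i) + " " + str(L[i]) + "\n" for i in range(len(self.table))])
--
--     def insert(self, key, value):
--         """ insert key,value into table
--             Allow repetitions of keys """
--         i = self.hash_mod(key) #hash on key only
--         item = [key, value]    #pack into one item
--         self.table[i].append(item)
--
--     def find(self, key):
--         """ returns ALL values of key as a list, empty list if none """
--         return [entry[1] \
--                 for entry in self.table[self.hash_mod(key)] \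
--                 if entry[0] == key]
-- ===== SOURCE B (Python) =====
-- def suffix_prefix_overlap_hash1(lst, k):
--     """Direct nested scan: compare every suffix slice with every prefix slice."""
--     n = len(lst)
--     out = []
--     for prefix in range(n):
--         for suffix in range(n):
--             if suffix != prefix and lst[suffix][-k:] == lst[prefix][:k]:
--                 out.append((suffix, prefix))
--     return out
-- ===== Notes on version B (the rewrite author's own statement) =====
-- stated objective: simpler
-- what changed: Replaced the custom hash table (build buckets of suffix slices, then look up each prefix slice) by a direct nested scan over index pairs comparing the slices.
import Mathlib
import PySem

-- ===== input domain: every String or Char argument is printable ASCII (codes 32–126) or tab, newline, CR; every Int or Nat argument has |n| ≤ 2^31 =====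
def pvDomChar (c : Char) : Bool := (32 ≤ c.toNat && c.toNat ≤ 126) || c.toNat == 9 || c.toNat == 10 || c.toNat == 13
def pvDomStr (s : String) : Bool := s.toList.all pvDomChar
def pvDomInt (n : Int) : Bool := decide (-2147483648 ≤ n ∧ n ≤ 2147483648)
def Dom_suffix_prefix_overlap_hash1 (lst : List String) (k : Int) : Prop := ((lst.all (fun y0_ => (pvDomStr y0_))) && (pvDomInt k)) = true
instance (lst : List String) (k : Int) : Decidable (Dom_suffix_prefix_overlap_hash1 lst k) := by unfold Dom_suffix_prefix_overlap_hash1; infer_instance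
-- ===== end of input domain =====

-- B replaces A's custom hash-table index by a direct nested index scan: simpler, same results in the same order.


-- ===== PORT A =====
-- A's Dict hash function is CPython's salted `hash`; `find` filters its bucket by key
-- equality, so the returned values are independent of the hash. The port uses the
-- constant hash 0 (all items land in bucket 0), which is exact for the result.
def pvTableInsert (t : List (List (List Char × Int))) (key : List Char) (v : Int) :
    List (List (List Char × Int)) :=
  t.set 0 ((t.getD 0 []) ++ [(key, v)])

def pvTableFind (t : List (List (List Char × Int))) (key : List Char) : List Int :=
  ((t.getD 0 []).filter (fun e => e.1 == key)).map (fun e => e.2)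

def suffix_prefix_overlap_hash1 (lst : List String) (k : Int) : List (Int × Int) :=
  let n : Int := (lst.length : Int)
  let table0 : List (List (List Char × Int)) := (PySem.List.pyRange 0 n 1).map (fun _ => [])
  let table := (PySem.List.pyRange 0 n 1).foldl
    (fun t i =>
      pvTableInsert t (PySem.List.slice (PySem.List.pyGetD lst i "").toList (some (-k)) none) i)
    table0
  (PySem.List.pyRange 0 n 1).foldl
    (fun acc prefix_ =>
      acc ++ ((pvTableFind table
                  (PySem.List.slice (PySem.List.pyGetD lst prefix_ "").toList none (some k))).filter
                (fun suffix_ => suffix_ != prefix_)).map (fun suffix_ => (suffix_, prefix_)))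
    []

-- ===== PORT B =====
def suffix_prefix_overlap_hash1_alt (lst : List String) (k : Int) : List (Int × Int) :=
  let n : Int := (lst.length : Int)
  (PySem.List.pyRange 0 n 1).foldl
    (fun out prefix_ =>
      (PySem.List.pyRange 0 n 1).foldl
        (fun out suffix_ =>
          if suffix_ != prefix_ &&
             (PySem.List.slice (PySem.List.pyGetD lst suffix_ "").toList (some (-k)) none
               == PySem.List.slice (PySem.List.pyGetD lst prefix_ "").toList none (some k))
          then out ++ [(suffix_, prefix_)] else out)
        out)
    []

-- ===== PRECONDITION & SPEC =====
def Spec_suffix_prefix_overlap_hash1 (lst : List String) (k : Int) (out : List (Int × Int)) : Prop := out = suffix_prefix_overlap_hash1_alt lst k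
instance (lst : List String) (k : Int) (out : List (Int × Int)) : Decidable (Spec_suffix_prefix_overlap_hash1 lst k out) := by unfold Spec_suffix_prefix_overlap_hash1; infer_instance

-- ===== CLAIM (what is proved, stated in full; the proofs are below) =====
def Claim_equal_suffix_prefix_overlap_hash1 : Prop := ∀ (lst : List String) (k : Int), Dom_suffix_prefix_overlap_hash1 lst k → Spec_suffix_prefix_overlap_hash1 lst k (suffix_prefix_overlap_hash1 lst k)

-- ===== LEMMAS AND PROOFS =====
theorem pv_table_build (idxs : List Int) (f : Int → List Char) (b : List (List Char × Int))
    (rest : List (List (List Char × Int))) :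
    idxs.foldl (fun t i => pvTableInsert t (f i) i) (b :: rest)
      = (b ++ idxs.map (fun i => (f i, i))) :: rest := by
  induction idxs generalizing b with
  | nil => simp
  | cons x xs ih =>
    rw [List.foldl_cons]
    have h1 : pvTableInsert (b :: rest) (f x) x = (b ++ [(f x, x)]) :: rest := by
      simp [pvTableInsert]
    rw [h1, ih]
    simp

theorem pv_find (idxs : List Int) (f : Int → List Char)
    (rest : List (List (List Char × Int))) (key : List Char) :
    pvTableFind ((idxs.map (fun i => (f i, i))) :: rest) key
      = idxs.filter (fun i => f i == key) := by
  simp [pvTableFind, List.filter_map, List.map_map, Function.comp_def]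

theorem pv_eq (lst : List String) (k : Int) :
    suffix_prefix_overlap_hash1 lst k = suffix_prefix_overlap_hash1_alt lst k := by
  unfold suffix_prefix_overlap_hash1 suffix_prefix_overlap_hash1_alt
  cases lst with
  | nil => rfl
  | cons hd tl =>
    have hn : (0:Int) < ((hd :: tl).length : Int) := by simp
    dsimp only
    rw [PySem.List.pyRange_one_cons hn]
    simp only [List.map_cons]
    rw [pv_table_build (f := fun i => PySem.List.slice (PySem.List.pyGetD (hd :: tl) i "").toList (some (-k)) none)]
    apply PySem.List.foldl_congr_mem
    intro acc p hp
    rw [List.nil_append, pv_find, PySem.List.foldl_append_if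
      (p := fun s => (s != p) && (PySem.List.slice (PySem.List.pyGetD (hd::tl) s "").toList (some (-k)) none == PySem.List.slice (PySem.List.pyGetD (hd::tl) p "").toList none (some k)))
      (f := fun s => (s, p))]
    congr 1
    rw [List.filter_filter]

-- ===== VERDICT (by name: the statement is the Claim_ definition above) =====
theorem suffix_prefix_overlap_hash1_spec : Claim_equal_suffix_prefix_overlap_hash1 := by
  intro lst k _
  unfold Spec_suffix_prefix_overlap_hash1
  exact pv_eq lst k
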